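-- pv_equiv track=rewrite | github.com/Rajashekarreddy111/Time_Table_ | backend/services/timetable_generator.py | _build_session_adjacency
-- ===== SOURCE A (Python) =====
-- def _build_session_adjacency(sessions: list[tuple[int, ...]]) -> dict[int, set[int]]:
--     adjacency: dict[int, set[int]] = {}
--     for session in sessions:
--         ordered = list(session)
--         for idx, period in enumerate(ordered):
--             if idx > 0:
--                 adjacency.setdefault(period, set()).add(ordered[idx - 1])
--             if idx + 1 < len(ordered):
--                 adjacency.setdefault(period, set()).add(ordered[idx + 1])
--     return adjacency
-- ===== SOURCE B (Python) =====
-- def _build_session_adjacency(sessions: list[tuple[int, ...]]) -> dict[int, set[int]]: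
--     # Stage 1: materialise every directed consecutive-adjacency edge.
--     edges = [e
--              for session in sessions
--              for pair in zip(session, session[1:])
--              for e in (pair, (pair[1], pair[0]))]
--     # Stage 2: group edges by source, keys in first-appearance order.
--     return {src: {dst for s, dst in edges if s == src}
--             for src in dict.fromkeys(s for s, _ in edges)}
-- ===== Notes on version B (the rewrite author's own statement) =====
-- stated objective: alternative
-- what changed: B replaces A's single-pass mutable dict-of-sets construction (setdefault/add per vertex with index guards) by a two-stage functional pipeline: first materialise the full directed edge list, then build the result in one dict comprehension that groups edge targets per source key (keys in first-appearance order via dict.fromkeys), with no in-place mutation at all.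
import Mathlib
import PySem

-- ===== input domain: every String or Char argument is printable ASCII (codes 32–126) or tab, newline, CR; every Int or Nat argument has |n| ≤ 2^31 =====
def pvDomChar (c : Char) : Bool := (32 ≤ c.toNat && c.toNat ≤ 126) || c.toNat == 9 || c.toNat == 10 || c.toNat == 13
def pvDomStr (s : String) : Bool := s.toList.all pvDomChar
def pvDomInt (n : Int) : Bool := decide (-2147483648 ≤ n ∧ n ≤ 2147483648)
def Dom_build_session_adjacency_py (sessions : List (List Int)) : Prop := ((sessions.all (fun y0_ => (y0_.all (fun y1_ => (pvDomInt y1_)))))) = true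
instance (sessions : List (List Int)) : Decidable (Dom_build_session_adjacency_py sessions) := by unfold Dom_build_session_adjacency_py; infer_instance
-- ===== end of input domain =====

-- B replaces A's single-pass mutable dict construction by a two-stage pipeline: materialise
-- the directed edge list, then group targets per source in a dict comprehension (alternative).


-- ===== PORT A =====
-- A's 'adjacency.setdefault(period, set()).add(x)'
def pvSetdefaultAdd (d : PySem.Dict Int (PySem.Set Int)) (k v : Int) : PySem.Dict Int (PySem.Set Int) :=
  PySem.Dict.modify d k PySem.Set.empty (fun s => PySem.Set.add s v)

-- loop body of A: 'if idx > 0: …add(ordered[idx-1]); if idx + 1 < len(ordered): …add(ordered[idx+1])'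
-- (the pyGet? defaults are never used: the guards put idx-1 / idx+1 in range)
def pvAStep (ordered : List Int) (adj : PySem.Dict Int (PySem.Set Int)) (ip : Int × Int) :
    PySem.Dict Int (PySem.Set Int) :=
  let idx := ip.1
  let period := ip.2
  let adj := if 0 < idx then
      pvSetdefaultAdd adj period ((PySem.List.pyGet? ordered (idx - 1)).getD 0) else adj
  if idx + 1 < PySem.List.len ordered then
      pvSetdefaultAdd adj period ((PySem.List.pyGet? ordered (idx + 1)).getD 0) else adj

def build_session_adjacency_py (sessions : List (List Int)) : List (Int × List Int) :=
  (sessions.foldl (fun adj session =>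
      let ordered := session   -- ordered = list(session)
      (PySem.List.enumerate ordered 0).foldl (pvAStep ordered) adj)
    PySem.Dict.empty).items

-- ===== PORT B =====
-- stage 1 of Source B: the directed edge list
--   [e for session in sessions for pair in zip(session, session[1:]) for e in (pair, (pair[1], pair[0]))]
def pvEdges (sessions : List (List Int)) : List (Int × Int) :=
  sessions.flatMap (fun session =>
    (session.zip (session.drop 1)).flatMap (fun pair => [(pair.1, pair.2), (pair.2, pair.1)]))

-- stage 2 of Source B: {src: {dst for s, dst in edges if s == src} for src in dict.fromkeys(s for s, _ in edges)}
def build_session_adjacency_py_alt (sessions : List (List Int)) : List (Int × List Int) :=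
  let edges := pvEdges sessions
  (PySem.List.dedup (edges.map Prod.fst)).map
    (fun src => (src, PySem.Set.ofList ((edges.filter (fun e => e.1 == src)).map Prod.snd)))

-- ===== PRECONDITION & SPEC =====
def Spec_build_session_adjacency_py (sessions : List (List Int)) (out : List (Int × List Int)) : Prop := out = build_session_adjacency_py_alt sessions
instance (sessions : List (List Int)) (out : List (Int × List Int)) : Decidable (Spec_build_session_adjacency_py sessions out) := by unfold Spec_build_session_adjacency_py; infer_instance

-- ===== CLAIM (what is proved, stated in full; the proofs are below) =====
def Claim_equal_build_session_adjacency_py : Prop := ∀ (sessions : List (List Int)), Dom_build_session_adjacency_py sessions → Spec_build_session_adjacency_py sessions (build_session_adjacency_py sessions)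

-- ===== LEMMAS AND PROOFS =====

-- the flattened (key, added-element) operation sequence of one session's consecutive pairs
def pvOpsB (xs : List Int) : List (Int × Int) :=
  (xs.zip (xs.drop 1)).flatMap (fun pc => [(pc.1, pc.2), (pc.2, pc.1)])

-- the op contributed by looking at the successor of x (nothing if x is last)
def pvHeadOp (x : Int) : List Int → List (Int × Int)
  | [] => []
  | y :: _ => [(x, y)]

-- the operation sequence of A's inner loop, parametrised by the previous element (none at idx 0)
def pvOpsA : Option Int → List Int → List (Int × Int)
  | _, [] => []
  | none, x :: xs => pvHeadOp x xs ++ pvOpsA (some x) xs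
  | some p, x :: xs => (x, p) :: (pvHeadOp x xs ++ pvOpsA (some x) xs)

def pvApply (d : PySem.Dict Int (PySem.Set Int)) (op : Int × Int) : PySem.Dict Int (PySem.Set Int) :=
  pvSetdefaultAdd d op.1 op.2

-- the grouping view of a fold of pvApply from the empty dict
def pvGroup (ops : List (Int × Int)) : List (Int × List Int) :=
  (PySem.List.dedup (ops.map Prod.fst)).map
    (fun k => (k, PySem.Set.ofList ((ops.filter (fun e => e.1 == k)).map Prod.snd)))

lemma pvOpsA_tail (xs : List Int) : ∀ (x : Int),
    pvHeadOp x xs ++ pvOpsA (some x) xs = pvOpsB (x :: xs) := by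
  induction xs with
  | nil => intro x; rfl
  | cons y ys ih =>
    intro x
    show (x, y) :: pvOpsA (some x) (y :: ys) = pvOpsB (x :: y :: ys)
    rw [show pvOpsA (some x) (y :: ys) = (y, x) :: (pvHeadOp y ys ++ pvOpsA (some y) ys) from rfl,
        ih y]
    rfl

lemma pvOpsA_none (xs : List Int) : pvOpsA none xs = pvOpsB xs := by
  cases xs with
  | nil => rfl
  | cons x t => exact pvOpsA_tail t x

lemma pvA_inner_ops (xs : List Int) :
    ∀ (pre : List Int) (d : PySem.Dict Int (PySem.Set Int)),
    (PySem.List.enumerate xs (pre.length : Int)).foldl (pvAStep (pre ++ xs)) d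
      = (pvOpsA pre.getLast? xs).foldl pvApply d := by
  induction xs with
  | nil => intro pre d; simp [PySem.List.enumerate_nil, pvOpsA]
  | cons x rest ih =>
    intro pre d
    rw [PySem.List.enumerate_cons]
    have hpre : (pre ++ x :: rest) = (pre ++ [x]) ++ rest := by simp
    have hlen : ((pre.length : Int) + 1) = (((pre ++ [x]).length : Nat) : Int) := by
      simp
    have hstep : pvAStep (pre ++ x :: rest) d ((pre.length : Int), x)
        = ((match pre.getLast? with | none => [] | some p => [(x, p)]) ++
           pvHeadOp x rest).foldl pvApply d := by
      rcases List.eq_nil_or_concat pre with h | ⟨q, p, h⟩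
      · subst h
        cases rest with
        | nil => simp [pvAStep, pvHeadOp, PySem.List.len]
        | cons y ys =>
          simp [pvAStep, pvHeadOp, PySem.List.len, pvApply,
                PySem.List.pyGet?, PySem.List.pyIdx?]
      · rw [List.concat_eq_append] at h
        subst h
        have hp1 : PySem.List.pyGet? ((q ++ [p]) ++ x :: rest) (((q ++ [p]).length : Int) - 1)
            = some p := by
          rw [show (((q ++ [p]).length : Int) - 1) = ((q.length : Nat) : Int) by simp]
          rw [PySem.List.pyGet?_natCast]
          rw [show (q ++ [p]) ++ x :: rest = q ++ (p :: x :: rest) by simp]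
          rw [List.getElem?_append_right (by simp)]
          simp
        have hgl : (q ++ [p]).getLast? = some p := by simp
        cases rest with
        | nil =>
          have hlt : ¬ (((q ++ [p]).length : Int) + 1 < PySem.List.len ((q ++ [p]) ++ [x])) := by
            simp [PySem.List.len]
            omega
          simp only [pvAStep, hgl, pvHeadOp]
          rw [if_neg hlt, if_pos (by simp), hp1]
          rfl
        | cons y ys =>
          have hp2 : PySem.List.pyGet? ((q ++ [p]) ++ x :: y :: ys)
              (((q ++ [p]).length : Int) + 1) = some y := by
            rw [show (((q ++ [p]).length : Int) + 1) = ((q.length + 2 : Nat) : Int) by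
              simp; omega]
            rw [PySem.List.pyGet?_natCast]
            rw [show (q ++ [p]) ++ x :: y :: ys = (((q ++ [p]) ++ [x]) ++ (y :: ys)) by simp]
            rw [List.getElem?_append_right (by simp)]
            simp
          have hlt : ((q ++ [p]).length : Int) + 1 < PySem.List.len ((q ++ [p]) ++ x :: y :: ys) := by
            simp [PySem.List.len]
            omega
          simp only [pvAStep, hgl, pvHeadOp]
          rw [if_pos hlt, if_pos (by simp), hp1, hp2]
          rfl
    rw [List.foldl_cons, hstep, hpre, hlen, ih (pre ++ [x])]
    rw [← List.foldl_append]
    cases hgl : pre.getLast? with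
    | none =>
      have hpe : pre = [] := List.getLast?_eq_none_iff.mp hgl
      subst hpe
      simp [pvOpsA]
    | some p =>
      simp [pvOpsA]

-- A's inner loop over one session is the fold of pvApply over that session's op sequence
lemma pvA_inner_eq (xs : List Int) (d : PySem.Dict Int (PySem.Set Int)) :
    (PySem.List.enumerate xs 0).foldl (pvAStep xs) d = (pvOpsB xs).foldl pvApply d := by
  have h := pvA_inner_ops xs [] d
  simp only [List.length_nil, Nat.cast_zero, List.nil_append, List.getLast?_nil] at h
  rw [h, pvOpsA_none]

-- A's outer loop flattens to one fold of pvApply over all sessions' ops (= pvEdges)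
lemma pvA_outer_flat (sessions : List (List Int)) (d : PySem.Dict Int (PySem.Set Int)) :
    sessions.foldl (fun adj session =>
        (PySem.List.enumerate session 0).foldl (pvAStep session) adj) d
      = (sessions.flatMap pvOpsB).foldl pvApply d := by
  induction sessions generalizing d with
  | nil => rfl
  | cons s t ih =>
    simp only [List.foldl_cons, List.flatMap_cons, List.foldl_append, pvA_inner_eq s d, ih]

-- keys of the grouping view are the deduplicated sources
lemma pvGroup_keys (ops : List (Int × Int)) :
    (pvGroup ops).map Prod.fst = PySem.List.dedup (ops.map Prod.fst) := by
  simp [pvGroup, List.map_map, Function.comp_def]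

-- main invariant: the items of the fold of pvApply from empty are the grouping view
lemma pvFold_items (ops : List (Int × Int)) :
    ((ops.foldl pvApply PySem.Dict.empty).items) = pvGroup ops := by
  induction ops using List.reverseRecOn with
  | nil => rfl
  | append_singleton ops kv ih =>
    obtain ⟨k, v⟩ := kv
    rw [List.foldl_append, List.foldl_cons, List.foldl_nil]
    set Dd := ops.foldl pvApply PySem.Dict.empty with hDd
    have hkeys : Dd.keys = PySem.List.dedup (ops.map Prod.fst) := by
      rw [show Dd.keys = Dd.items.map Prod.fst from rfl, ih, pvGroup_keys]
    have hnodup : Dd.keys.Nodup := by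
      rw [hkeys, PySem.List.dedup_eq_ofList]; exact PySem.Set.nodup_ofList _
    have happly : pvApply Dd (k, v)
        = Dd.insert k (PySem.Set.add (Dd.getD k PySem.Set.empty) v) := rfl
    have hfilter : ∀ k' : Int, (ops ++ [(k, v)]).filter (fun e => e.1 == k')
        = ops.filter (fun e => e.1 == k') ++ (if k = k' then [(k, v)] else []) := by
      intro k'
      rw [List.filter_append]
      by_cases h : k = k' <;> simp [h]
    have hdedup : PySem.List.dedup ((ops ++ [(k, v)]).map Prod.fst)
        = PySem.Set.add (PySem.List.dedup (ops.map Prod.fst)) k := by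
      simp only [List.map_append, List.map_cons, List.map_nil, PySem.List.dedup_eq_ofList]
      exact PySem.Set.ofList_append_singleton _ _
    by_cases hk : k ∈ PySem.List.dedup (ops.map Prod.fst)
    · -- key already present: insert updates in place
      have hkmem : k ∈ ops.map Prod.fst := by
        rwa [PySem.List.mem_dedup] at hk
      have hcont : Dd.contains k = true := by
        rw [PySem.Dict.contains_eq_decide_mem_keys, hkeys]; simpa using hk
      have hgetD : Dd.getD k PySem.Set.empty
          = PySem.Set.ofList ((ops.filter (fun e => e.1 == k)).map Prod.snd) := by
        apply PySem.Dict.getD_of_mem_items Dd (by rw [ih]; exact List.mem_map_of_mem hk) hnodup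
      rw [happly, PySem.Dict.items_insert_of_contains _ _ hcont, ih]
      unfold pvGroup
      rw [hdedup, PySem.Set.add_of_mem hk, List.map_map]
      apply List.map_congr_left
      intro k' hk'
      by_cases h : k' = k
      · subst h
        simp only [Function.comp_apply, BEq.rfl, if_true]
        rw [hgetD, hfilter, if_pos rfl]
        simp [PySem.Set.ofList_append_singleton, PySem.Set.add]
      · simp only [Function.comp_apply]
        rw [if_neg (by simp [h]), hfilter, if_neg (fun hh => h hh.symm)]
        simp
    · -- fresh key: insert appends
      have hkmem : k ∉ ops.map Prod.fst := by
        rwa [PySem.List.mem_dedup] at hk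
      have hcont : Dd.contains k = false := by
        rw [PySem.Dict.contains_eq_decide_mem_keys, hkeys]; simpa using hk
      have hgetD : Dd.getD k PySem.Set.empty = PySem.Set.empty :=
        PySem.Dict.getD_of_not_contains _ _ hcont
      have hfe : ops.filter (fun e => e.1 == k) = [] := by
        rw [List.filter_eq_nil_iff]
        intro e he hbeq
        exact hkmem (by
          have : e.1 = k := by simpa using hbeq
          exact this ▸ List.mem_map_of_mem he)
      rw [happly, PySem.Dict.items_insert_of_not_contains _ _ hcont, ih]
      unfold pvGroup
      rw [hdedup, PySem.Set.add_of_not_mem hk, List.map_append]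
      congr 1
      · apply List.map_congr_left
        intro k' hk'
        have hne : k ≠ k' := fun h => hk (h ▸ hk')
        rw [hfilter, if_neg hne]
        simp
      · rw [hgetD]
        simp [hfilter, hfe, PySem.Set.add, PySem.Set.ofList, PySem.Set.empty]

-- ===== VERDICT (by name: the statement is the Claim_ definition above) =====
theorem build_session_adjacency_py_spec : Claim_equal_build_session_adjacency_py := by
  intro sessions _
  unfold Spec_build_session_adjacency_py build_session_adjacency_py build_session_adjacency_py_alt
  rw [pvA_outer_flat, show sessions.flatMap pvOpsB = pvEdges sessions from rfl, pvFold_items]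
  rfl
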